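-- pv_equiv track=rewrite | github.com/daleathan/gramps-addons | gramps41/AddressPreview/AddressPreview.py | _fix_separators
-- ===== SOURCE A (Python) =====
-- class ElementType():
--     KEY = 1
--     SEPARATOR = 2
--     PREFIX = 3
--     SUFFIX = 4
--     PARSED = 0
--     PLAINTEXT = 5
--
-- def _fix_separators(tuple_list):
--     """
--     Should be used to convert suffixes and prefixes that orgin from enclosed parts of format string
--     into separators. Must be done before collect/suppress. Working ok?
--
--     :param tuple_list:
--     :return:
--     """
--     index = 0
--     new_tuple_list = []
--     for item, item_type in tuple_list:
--         if index > 0 and index < (len(tuple_list) - 1) \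
--                 and (item_type == ElementType.PREFIX or item_type == ElementType.SUFFIX):
--             new_tuple = item, ElementType.SEPARATOR
--         else:
--             new_tuple = item, item_type
--         new_tuple_list.append(new_tuple)
--         index += 1
--     return new_tuple_list
-- ===== SOURCE B (Python) =====
-- class ElementType():
--     KEY = 1
--     SEPARATOR = 2
--     PREFIX = 3
--     SUFFIX = 4
--     PARSED = 0
--     PLAINTEXT = 5
--
-- def _fix_separators(tuple_list):
--     if len(tuple_list) <= 2:
--         return [(item, item_type) for item, item_type in tuple_list]
--     middle = [(item,
--                ElementType.SEPARATOR
--                if item_type == ElementType.PREFIX or item_type == ElementType.SUFFIX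
--                else item_type)
--               for item, item_type in tuple_list[1:-1]]
--     return [tuple_list[0]] + middle + [tuple_list[-1]]
-- ===== Notes on version B (the rewrite author's own statement) =====
-- stated objective: simpler
-- what changed: Replaced the index counter and per-iteration bound check with a short-circuit for lists of length <= 2 plus a guard-free map over the interior slice tuple_list[1:-1], with the two fixed endpoints emitted outside the loop.
import Mathlib
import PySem

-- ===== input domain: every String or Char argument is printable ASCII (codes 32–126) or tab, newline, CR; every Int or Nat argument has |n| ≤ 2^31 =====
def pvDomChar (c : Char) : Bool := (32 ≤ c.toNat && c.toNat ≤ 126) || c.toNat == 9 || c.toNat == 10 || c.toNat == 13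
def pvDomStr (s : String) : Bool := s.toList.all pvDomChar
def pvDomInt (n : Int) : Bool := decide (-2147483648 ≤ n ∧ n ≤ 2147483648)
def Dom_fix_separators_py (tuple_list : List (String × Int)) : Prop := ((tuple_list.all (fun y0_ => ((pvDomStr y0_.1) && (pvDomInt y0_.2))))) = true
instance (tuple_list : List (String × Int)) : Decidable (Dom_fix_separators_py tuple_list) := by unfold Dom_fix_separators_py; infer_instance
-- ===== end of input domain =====

-- B hoists the two fixed endpoints out of the loop and maps the guard-free
-- conversion over the interior slice; same O(n) cost, simpler decomposition.

-- ===== PORT A =====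
-- A: indexed loop; interior PREFIX(3)/SUFFIX(4) elements become SEPARATOR(2).
def fix_separators_py (tuple_list : List (String × Int)) : List (String × Int) :=
  (tuple_list.foldl
    (fun (st : Int × List (String × Int)) it =>
      let new_tuple :=
        if 0 < st.1 ∧ st.1 < (tuple_list.length : Int) - 1 ∧ (it.2 = 3 ∨ it.2 = 4) then
          (it.1, (2 : Int))
        else
          (it.1, it.2)
      (st.1 + 1, st.2 ++ [new_tuple]))
    (0, [])).2

-- ===== PORT B =====
def fix_separators_py_alt (tuple_list : List (String × Int)) : List (String × Int) :=
  if (tuple_list.length : Int) ≤ 2 then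
    tuple_list.map (fun p => (p.1, p.2))
  else
    let middle :=
      (PySem.List.slice tuple_list (some 1) (some (-1))).map
        (fun p => (p.1, if p.2 = 3 ∨ p.2 = 4 then (2 : Int) else p.2))
    -- tuple_list[0] / tuple_list[-1]: in-range here since length ≥ 3
    [((PySem.List.pyGet? tuple_list 0).getD ("", 0))] ++ middle ++
      [((PySem.List.pyGet? tuple_list (-1)).getD ("", 0))]

-- ===== PRECONDITION & SPEC =====
def Spec_fix_separators_py (tuple_list : List (String × Int)) (out : List (String × Int)) : Prop := out = fix_separators_py_alt tuple_list
instance (tuple_list : List (String × Int)) (out : List (String × Int)) : Decidable (Spec_fix_separators_py tuple_list out) := by unfold Spec_fix_separators_py; infer_instance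

-- ===== CLAIM (what is proved, stated in full; the proofs are below) =====
def Claim_equal_fix_separators_py : Prop := ∀ (tuple_list : List (String × Int)), Dom_fix_separators_py tuple_list → Spec_fix_separators_py tuple_list (fix_separators_py tuple_list)

-- ===== LEMMAS AND PROOFS =====

-- recursive characterisation of A's indexed loop
def gA (n : Int) (i : Int) : List (String × Int) → List (String × Int)
  | [] => []
  | x :: xs =>
    (if 0 < i ∧ i < n - 1 ∧ (x.2 = 3 ∨ x.2 = 4) then (x.1, (2 : Int)) else (x.1, x.2))
      :: gA n (i + 1) xs

theorem foldl_gA (n i : Int) (acc : List (String × Int)) (l : List (String × Int)) :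
    (l.foldl
      (fun (st : Int × List (String × Int)) it =>
        let new_tuple :=
          if 0 < st.1 ∧ st.1 < n - 1 ∧ (it.2 = 3 ∨ it.2 = 4) then (it.1, (2 : Int))
          else (it.1, it.2)
        (st.1 + 1, st.2 ++ [new_tuple]))
      (i, acc)).2 = acc ++ gA n i l := by
  induction l generalizing i acc with
  | nil => simp [gA]
  | cons x xs ih => simp [gA, ih]

theorem fix_separators_py_eq_gA (tl : List (String × Int)) :
    fix_separators_py tl = gA (tl.length : Int) 0 tl := by
  unfold fix_separators_py
  simpa using foldl_gA (tl.length : Int) 0 [] tl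

theorem gA_interior (n : Int) (mid : List (String × Int)) (z : String × Int) :
    ∀ i : Int, 0 < i → i + mid.length + 1 = n →
    gA n i (mid ++ [z]) =
      mid.map (fun p => (p.1, if p.2 = 3 ∨ p.2 = 4 then (2 : Int) else p.2)) ++ [(z.1, z.2)] := by
  induction mid with
  | nil =>
      intro i hi hn
      have : ¬ (0 < i ∧ i < n - 1 ∧ (z.2 = 3 ∨ z.2 = 4)) := by
        rintro ⟨_, h2, _⟩; simp at hn; omega
      simp [gA, this]
  | cons x xs ih =>
      intro i hi hn
      have hlt : i < n - 1 := by simp at hn; omega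
      have := ih (i + 1) (by omega) (by simp at hn ⊢; omega)
      by_cases hc : x.2 = 3 ∨ x.2 = 4 <;>
        simp [gA, hi, hlt, hc, this]

theorem fix_separators_py_spec_aux (tl : List (String × Int)) :
    fix_separators_py tl = fix_separators_py_alt tl := by
  rw [fix_separators_py_eq_gA]
  unfold fix_separators_py_alt
  by_cases h : (tl.length : Int) ≤ 2
  · simp only [h, if_true]
    match tl, h with
    | [], _ => simp [gA]
    | [x], _ => simp [gA]
    | [x, y], _ =>
        have : ¬ ((0 : Int) < 1 ∧ (1 : Int) < (2 : Int) - 1 ∧ (y.2 = 3 ∨ y.2 = 4)) := by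
          rintro ⟨_, h2, _⟩; omega
        simp [gA]
    | x :: y :: z :: rest, h => simp at h; omega
  · simp only [h, if_false]
    have h3 : 3 ≤ tl.length := by omega
    obtain ⟨x, rest, rfl⟩ : ∃ x rest, tl = x :: rest := by
      cases tl with
      | nil => simp at h3
      | cons a b => exact ⟨a, b, rfl⟩
    obtain ⟨mid, z, rfl⟩ : ∃ mid z, rest = mid ++ [z] := by
      rcases List.eq_nil_or_concat rest with h0 | h0
      · subst h0; simp at h3
      · obtain ⟨mid, z, rfl⟩ := h0; exact ⟨mid, z, by simp⟩
    -- endpoints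
    have hnn : (0 : Int) ≤ (mid.length : Int) + 1 := by positivity
    have hget0 : (PySem.List.pyGet? (x :: (mid ++ [z])) 0).getD ("", 0) = x := by
      simp [PySem.List.pyGet?, PySem.List.pyIdx?, hnn]
    have hslice : PySem.List.slice (x :: (mid ++ [z])) (some 1) (some (-1)) = mid := by
      have hnneg : ¬ ((mid.length : Int) + 1 < 0) := by omega
      simp [PySem.List.slice, PySem.List.clampIdx, hnneg]
    have hgetLast : (PySem.List.pyGet? (x :: (mid ++ [z])) (-1)).getD ("", 0) = z := by
      simp [PySem.List.pyGet?, PySem.List.pyIdx?]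
    -- the loop side
    have hn : ((x :: (mid ++ [z])).length : Int) = (mid.length : Int) + 2 := by
      push_cast [List.length_cons, List.length_append]; simp; ring
    have hcond0 : ¬ ((0 : Int) < 0 ∧ (0 : Int) < ((x :: (mid ++ [z])).length : Int) - 1
        ∧ (x.2 = 3 ∨ x.2 = 4)) := by rintro ⟨h0, _, _⟩; omega
    have hint := gA_interior ((x :: (mid ++ [z])).length : Int) mid z 1 (by omega)
      (by rw [hn]; omega)
    rw [hget0, hslice, hgetLast]
    simp only [gA]
    rw [if_neg hcond0, show (0 : Int) + 1 = 1 from rfl, hint]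
    simp
-- ===== VERDICT (by name: the statement is the Claim_ definition above) =====
theorem fix_separators_py_spec : Claim_equal_fix_separators_py := by
  intro tl _
  exact fix_separators_py_spec_aux tl
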